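-- pv_equiv track=rewrite | github.com/julektaraz/rag-kit | python-service/pipeline/multi_file_context.py | group_chunks_by_file
-- ===== SOURCE A (Python) =====
-- from typing import List, Dict, Set, Optional
-- from collections import defaultdict
--
-- def group_chunks_by_file(metadata: List[Dict]) -> Dict[str, List[int]]:
--     """
--     Group chunk indices by file path.
--
--     Args:
--         metadata: List of chunk metadata dicts
--
--     Returns:
--         Dict mapping file_path -> list of chunk indices
--     """
--     file_chunks = defaultdict(list)
--
--     for idx, chunk_meta in enumerate(metadata):
--         file_path = chunk_meta.get("file_path")
--         if file_path:
--             file_chunks[file_path].append(idx)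
--         else:
--             # Handle chunks without file_path (e.g., PDF chunks)
--             source = chunk_meta.get("source", "unknown")
--             file_chunks[source].append(idx)
--
--     return dict(file_chunks)
-- ===== SOURCE B (Python) =====
-- def group_chunks_by_file(metadata):
--     """
--     Group chunk indices by file path.
--
--     Two-pass reformulation: compute every chunk's grouping key up front,
--     then build each group's index list by scanning the key list once per
--     distinct key (distinct keys in first-occurrence order).
--     """
--     keys = [m.get("file_path") or m.get("source", "unknown") for m in metadata]
--     return {k: [i for i, kk in enumerate(keys) if kk == k]
--             for k in dict.fromkeys(keys)}
-- ===== Notes on version B (the rewrite author's own statement) =====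
-- stated objective: alternative
-- what changed: Replaces A's single-pass defaultdict accumulation with a two-pass decomposition: first compute every chunk's grouping key, then build each group by scanning the key list once per distinct key (distinct keys via dict.fromkeys in first-occurrence order).
import Mathlib
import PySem

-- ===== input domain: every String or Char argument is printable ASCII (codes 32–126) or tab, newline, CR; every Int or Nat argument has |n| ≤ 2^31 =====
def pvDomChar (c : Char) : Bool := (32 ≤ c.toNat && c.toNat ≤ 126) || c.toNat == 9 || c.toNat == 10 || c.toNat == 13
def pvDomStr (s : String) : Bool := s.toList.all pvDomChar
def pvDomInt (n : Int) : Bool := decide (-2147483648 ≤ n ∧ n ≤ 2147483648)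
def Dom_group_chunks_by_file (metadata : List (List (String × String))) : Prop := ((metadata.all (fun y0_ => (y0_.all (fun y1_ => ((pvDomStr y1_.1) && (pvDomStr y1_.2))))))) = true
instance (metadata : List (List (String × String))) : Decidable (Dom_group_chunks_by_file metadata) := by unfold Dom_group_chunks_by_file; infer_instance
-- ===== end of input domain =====

-- B changes the decomposition (two passes: key list + per-key index scans) instead of A's
-- single-pass defaultdict accumulation; objective: alternative (not faster).

-- ===== PORT A =====
-- literal transliteration of A's loop: enumerate, branch on truthiness of
-- chunk_meta.get("file_path"), append idx into a defaultdict(list), return its items.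
def group_chunks_by_file (metadata : List (List (String × String))) : List (String × List Int) :=
  ((PySem.List.enumerate metadata).foldl
    (fun d p =>
      match (PySem.Dict.mk p.2).get? "file_path" with
      | some fp =>
          if fp ≠ "" then d.modify fp [] (· ++ [p.1])
          else d.modify ((PySem.Dict.mk p.2).getD "source" "unknown") [] (· ++ [p.1])
      | none => d.modify ((PySem.Dict.mk p.2).getD "source" "unknown") [] (· ++ [p.1]))
    PySem.Dict.empty).items

-- ===== PORT B =====
-- key of one chunk: m.get("file_path") or m.get("source", "unknown")
def pvKeyB (cm : List (String × String)) : String :=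
  match (PySem.Dict.mk cm).get? "file_path" with
  | some fp => if fp = "" then (PySem.Dict.mk cm).getD "source" "unknown" else fp
  | none => (PySem.Dict.mk cm).getD "source" "unknown"

def group_chunks_by_file_alt (metadata : List (List (String × String))) : List (String × List Int) :=
  let keys := metadata.map pvKeyB
  (PySem.List.dedup keys).map (fun k =>
    (k, (PySem.List.enumerate keys).filterMap (fun p => if p.2 = k then some p.1 else none)))

-- ===== PRECONDITION & SPEC =====
def Spec_group_chunks_by_file (metadata : List (List (String × String))) (out : List (String × List Int)) : Prop := out = group_chunks_by_file_alt metadata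
instance (metadata : List (List (String × String))) (out : List (String × List Int)) : Decidable (Spec_group_chunks_by_file metadata out) := by unfold Spec_group_chunks_by_file; infer_instance

-- ===== CLAIM (what is proved, stated in full; the proofs are below) =====
def Claim_equal_group_chunks_by_file : Prop := ∀ (metadata : List (List (String × String))), Dom_group_chunks_by_file metadata → Spec_group_chunks_by_file metadata (group_chunks_by_file metadata)

-- ===== LEMMAS AND PROOFS =====

-- A's branch in the loop computes exactly pvKeyB of the chunk
theorem pvFoldBody_eq :
    (fun (d : PySem.Dict String (List Int)) (p : Int × List (String × String)) =>
      match (PySem.Dict.mk p.2).get? "file_path" with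
      | some fp =>
          if fp ≠ "" then d.modify fp [] (· ++ [p.1])
          else d.modify ((PySem.Dict.mk p.2).getD "source" "unknown") [] (· ++ [p.1])
      | none => d.modify ((PySem.Dict.mk p.2).getD "source" "unknown") [] (· ++ [p.1]))
    = (fun d p => d.modify (pvKeyB p.2) [] (· ++ [p.1])) := by
  funext d p
  unfold pvKeyB
  cases h : (PySem.Dict.mk p.2).get? "file_path" with
  | none => simp
  | some s => by_cases hs : s = "" <;> simp [hs]

theorem pvEnumerate_map {α β : Type} (xs : List α) (g : α → β) (s : Int) :
    PySem.List.enumerate (xs.map g) s = (PySem.List.enumerate xs s).map (fun p => (p.1, g p.2)) := by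
  induction xs generalizing s with
  | nil => rfl
  | cons x t ih => simp [PySem.List.enumerate_cons, ih]

-- ===== VERDICT (by name: the statement is the Claim_ definition above) =====
theorem group_chunks_by_file_spec : Claim_equal_group_chunks_by_file := by
  intro metadata _
  show group_chunks_by_file metadata = group_chunks_by_file_alt metadata
  unfold group_chunks_by_file group_chunks_by_file_alt
  rw [pvFoldBody_eq]
  dsimp only
  set L := PySem.List.enumerate metadata 0 with hL
  -- rewrite the fold over L as a fold over (key, idx) pairs
  have hfold : L.foldl (fun d p => d.modify (pvKeyB p.2) [] (· ++ [p.1])) PySem.Dict.empty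
      = (L.map (fun p => (pvKeyB p.2, p.1))).foldl
          (fun d p => d.modify p.1 [] (· ++ [p.2])) PySem.Dict.empty := by
    rw [List.foldl_map]
  rw [hfold]
  set P := L.map (fun p => (pvKeyB p.2, p.1)) with hP
  set D := P.foldl (fun d p => d.modify p.1 [] (· ++ [p.2])) PySem.Dict.empty with hD
  have hkeysmap : P.map (·.1) = metadata.map pvKeyB := by
    rw [hP, List.map_map, hL]
    have h2 : ((fun x => x.1) ∘ fun (p : Int × List (String × String)) => (pvKeyB p.2, p.1))
        = (pvKeyB ∘ fun p => p.2) := rfl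
    rw [h2, ← List.map_map, PySem.List.map_snd_enumerate]
  have hnodup : D.keys.Nodup := by
    rw [hD]
    have := PySem.Dict.nodup_keys_foldl_modify_key P (·.1) ([] : List Int)
      (fun _ p v => v ++ [p.2]) PySem.Dict.empty (by simp)
    simpa using this
  have hkeys : D.keys = PySem.List.dedup (metadata.map pvKeyB) := by
    rw [hD]
    have := PySem.Dict.keys_foldl_modify_key P (·.1) ([] : List Int)
      (fun _ p v => v ++ [p.2]) PySem.Dict.empty
    simp only at this
    rw [this, hkeysmap]
    rfl
  rw [PySem.Dict.items_eq_map_keys D hnodup ([] : List Int), hkeys]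
  apply List.map_congr_left
  intro k _
  have hget : D.getD k [] = (P.filter (fun p => p.1 == k)).map (·.2) := by
    rw [hD]
    have := PySem.Dict.getD_foldl_modify_append P PySem.Dict.empty k
    simpa using this
  rw [hget]
  congr 1
  -- both sides are the ascending indices whose key is k
  rw [hP, pvEnumerate_map metadata pvKeyB 0]
  rw [List.filter_map, List.map_map, List.filterMap_map]
  rw [← hL]
  induction L with
  | nil => rfl
  | cons p t ih =>
    by_cases h : pvKeyB p.2 = k <;>
      simp [Function.comp, h, ih]
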